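-- pv_equiv track=rewrite | github.com/ASDEAhardware/bfg | backend/mqtt/services/message_processor.py | _infer_sensor_type
-- ===== SOURCE A (Python) =====
-- from typing import Dict, Any, List, Optional
--
-- def _infer_sensor_type(sensor_data: Dict[str, Any]) -> str:
--     """
--     Inferisce il tipo di sensore dai dati.
--
--     Args:
--         sensor_data: Dati del sensore
--
--     Returns:
--         str: Tipo di sensore inferito
--     """
--     # Cerca pattern nei nomi dei campi per inferire tipo
--     fields = sensor_data.keys()
--
--     if any(field.startswith('acc') for field in fields):
--         return 'accelerometer'
--     elif any(field.startswith('gyro') for field in fields):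
--         return 'gyroscope'
--     elif any(field.startswith('mag') for field in fields):
--         return 'magnetometer'
--     elif any(field.startswith('incli') for field in fields):
--         return 'inclinometer'
--     elif any(field in ['temperature', 'temp'] for field in fields):
--         return 'temperature'
--     elif any(field in ['humidity', 'hum'] for field in fields):
--         return 'humidity'
--     elif any(field in ['pressure', 'press'] for field in fields):
--         return 'pressure'
--     else:
--         return 'other'
-- ===== SOURCE B (Python) =====
-- def _infer_sensor_type(sensor_data):
--     """Single pass over the fields, tracking the best (lowest) matching priority."""
--     best = 7
--     for field in sensor_data.keys():
--         if field.startswith('acc'):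
--             p = 0
--         elif field.startswith('gyro'):
--             p = 1
--         elif field.startswith('mag'):
--             p = 2
--         elif field.startswith('incli'):
--             p = 3
--         elif field in ('temperature', 'temp'):
--             p = 4
--         elif field in ('humidity', 'hum'):
--             p = 5
--         elif field in ('pressure', 'press'):
--             p = 6
--         else:
--             p = 7
--         if p < best:
--             best = p
--     return ['accelerometer', 'gyroscope', 'magnetometer', 'inclinometer',
--             'temperature', 'humidity', 'pressure', 'other'][best]
-- ===== Notes on version B (the rewrite author's own statement) =====
-- stated objective: alternative
-- what changed: Replaced A's seven separate any(...) scans over the key set by one field-first pass that keeps the minimum matching priority per field and maps it to a label at the end.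
import Mathlib
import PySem

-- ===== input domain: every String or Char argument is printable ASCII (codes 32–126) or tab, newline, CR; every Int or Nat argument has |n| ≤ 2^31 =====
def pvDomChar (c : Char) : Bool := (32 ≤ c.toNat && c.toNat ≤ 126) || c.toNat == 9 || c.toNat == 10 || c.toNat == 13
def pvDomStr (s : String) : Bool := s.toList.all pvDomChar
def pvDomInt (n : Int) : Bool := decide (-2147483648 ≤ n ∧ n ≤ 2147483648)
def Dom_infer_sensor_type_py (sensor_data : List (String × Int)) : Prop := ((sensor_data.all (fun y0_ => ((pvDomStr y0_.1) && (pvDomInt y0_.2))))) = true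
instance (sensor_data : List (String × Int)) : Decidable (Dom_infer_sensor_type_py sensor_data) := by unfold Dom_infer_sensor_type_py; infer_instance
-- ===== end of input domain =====

-- B replaces A's seven separate any(...) scans over the keys by a single pass that
-- tracks the minimum matching priority per field (objective: alternative decomposition).


-- ===== PORT A =====
def infer_sensor_type_py (sensor_data : List (String × Int)) : String :=
  let fields := sensor_data.map Prod.fst
  if fields.any (fun f => PySem.Str.startswith f "acc") then "accelerometer"
  else if fields.any (fun f => PySem.Str.startswith f "gyro") then "gyroscope"
  else if fields.any (fun f => PySem.Str.startswith f "mag") then "magnetometer"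
  else if fields.any (fun f => PySem.Str.startswith f "incli") then "inclinometer"
  else if fields.any (fun f => f == "temperature" || f == "temp") then "temperature"
  else if fields.any (fun f => f == "humidity" || f == "hum") then "humidity"
  else if fields.any (fun f => f == "pressure" || f == "press") then "pressure"
  else "other"

-- ===== PORT B =====
-- priority of a single field (first matching rule wins)
def pvPrio (f : String) : Nat :=
  if PySem.Str.startswith f "acc" then 0
  else if PySem.Str.startswith f "gyro" then 1
  else if PySem.Str.startswith f "mag" then 2
  else if PySem.Str.startswith f "incli" then 3
  else if f == "temperature" || f == "temp" then 4
  else if f == "humidity" || f == "hum" then 5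
  else if f == "pressure" || f == "press" then 6
  else 7

def pvLabel (best : Nat) : String :=
  if best = 0 then "accelerometer"
  else if best = 1 then "gyroscope"
  else if best = 2 then "magnetometer"
  else if best = 3 then "inclinometer"
  else if best = 4 then "temperature"
  else if best = 5 then "humidity"
  else if best = 6 then "pressure"
  else "other"

def infer_sensor_type_py_alt (sensor_data : List (String × Int)) : String :=
  let best := (sensor_data.map Prod.fst).foldl
    (fun b f => let p := pvPrio f; if p < b then p else b) 7
  pvLabel best

-- ===== PRECONDITION & SPEC =====
def Spec_infer_sensor_type_py (sensor_data : List (String × Int)) (out : String) : Prop := out = infer_sensor_type_py_alt sensor_data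
instance (sensor_data : List (String × Int)) (out : String) : Decidable (Spec_infer_sensor_type_py sensor_data out) := by unfold Spec_infer_sensor_type_py; infer_instance

-- ===== CLAIM (what is proved, stated in full; the proofs are below) =====
def Claim_equal_infer_sensor_type_py : Prop := ∀ (sensor_data : List (String × Int)), Dom_infer_sensor_type_py sensor_data → Spec_infer_sensor_type_py sensor_data (infer_sensor_type_py sensor_data)

-- ===== LEMMAS AND PROOFS =====

-- the fold B performs, as structural recursion
def pvFold (b : Nat) : List String → Nat
  | [] => b
  | f :: t => pvFold (if pvPrio f < b then pvPrio f else b) t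

theorem pvFold_eq_foldl : ∀ (fields : List String) (b : Nat),
    fields.foldl (fun b f => let p := pvPrio f; if p < b then p else b) b = pvFold b fields := by
  intro fields
  induction fields with
  | nil => intro b; rfl
  | cons f t ih => intro b; simp only [List.foldl_cons, pvFold]; exact ih _

theorem pvFold_le_init : ∀ (fields : List String) (b : Nat), pvFold b fields ≤ b := by
  intro fields
  induction fields with
  | nil => intro b; simp [pvFold]
  | cons f t ih =>
      intro b
      simp only [pvFold]
      by_cases h : pvPrio f < b
      · rw [if_pos h]; exact le_trans (ih (pvPrio f)) (le_of_lt h)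
      · rw [if_neg h]; exact ih b

theorem pvFold_le_mem : ∀ (fields : List String) (b : Nat) (f : String),
    f ∈ fields → pvFold b fields ≤ pvPrio f := by
  intro fields
  induction fields with
  | nil => intro b f h; cases h
  | cons g t ih =>
      intro b f h
      rcases List.mem_cons.mp h with h | h
      · subst h
        simp only [pvFold]
        by_cases hlt : pvPrio f < b
        · rw [if_pos hlt]; exact pvFold_le_init t (pvPrio f)
        · rw [if_neg hlt]
          have := pvFold_le_init t b
          omega
      · simp only [pvFold]
        exact ih _ f h

theorem pvFold_ge : ∀ (fields : List String) (b k : Nat), k ≤ b →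
    (∀ f ∈ fields, k ≤ pvPrio f) → k ≤ pvFold b fields := by
  intro fields
  induction fields with
  | nil => intro b k hk _; simpa [pvFold] using hk
  | cons g t ih =>
      intro b k hk hall
      simp only [pvFold]
      by_cases hlt : pvPrio g < b
      · rw [if_pos hlt]
        exact ih _ k (hall g (List.mem_cons_self)) (fun f hf => hall f (List.mem_cons_of_mem _ hf))
      · rw [if_neg hlt]
        exact ih _ k hk (fun f hf => hall f (List.mem_cons_of_mem _ hf))

theorem pvAlt_eq (sd : List (String × Int)) :
    infer_sensor_type_py_alt sd = pvLabel (pvFold 7 (sd.map Prod.fst)) := by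
  unfold infer_sensor_type_py_alt
  rw [pvFold_eq_foldl]

theorem infer_sensor_type_py_spec : Claim_equal_infer_sensor_type_py := by
  intro sd _
  unfold Spec_infer_sensor_type_py infer_sensor_type_py
  rw [pvAlt_eq]
  set fields := sd.map Prod.fst with hf
  by_cases h0 : fields.any (fun f => PySem.Str.startswith f "acc") = true
  · rcases List.any_eq_true.mp h0 with ⟨f, hfm, hc⟩
    have hp : pvPrio f = 0 := by unfold pvPrio; rw [if_pos hc]
    have hbest : pvFold 7 fields = 0 := by
      have := pvFold_le_mem fields 7 f hfm; omega
    rw [if_pos h0, hbest]; rfl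
  · have hn0 : ∀ f ∈ fields, ¬ PySem.Str.startswith f "acc" = true := by
      intro f hfm hc; exact h0 (List.any_eq_true.mpr ⟨f, hfm, hc⟩)
    rw [if_neg h0]
    by_cases h1 : fields.any (fun f => PySem.Str.startswith f "gyro") = true
    · rcases List.any_eq_true.mp h1 with ⟨f, hfm, hc⟩
      have hp : pvPrio f = 1 := by
        unfold pvPrio; rw [if_neg (hn0 f hfm), if_pos hc]
      have hbest : pvFold 7 fields = 1 := by
        have hle := pvFold_le_mem fields 7 f hfm
        have := pvFold_ge fields 7 1 (by omega) (fun g hg => by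
          unfold pvPrio
          split_ifs with hg0
          · exact absurd hg0 (hn0 g hg)
          all_goals omega)
        omega
      rw [if_pos h1, hbest]; rfl
    · have hn1 : ∀ f ∈ fields, ¬ PySem.Str.startswith f "gyro" = true := by
        intro f hfm hc; exact h1 (List.any_eq_true.mpr ⟨f, hfm, hc⟩)
      rw [if_neg h1]
      by_cases h2 : fields.any (fun f => PySem.Str.startswith f "mag") = true
      · rcases List.any_eq_true.mp h2 with ⟨f, hfm, hc⟩
        have hp : pvPrio f = 2 := by
          unfold pvPrio; rw [if_neg (hn0 f hfm), if_neg (hn1 f hfm), if_pos hc]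
        have hbest : pvFold 7 fields = 2 := by
          have hle := pvFold_le_mem fields 7 f hfm
          have := pvFold_ge fields 7 2 (by omega) (fun g hg => by
            unfold pvPrio
            split_ifs with hg0 hg1
            · exact absurd hg0 (hn0 g hg)
            · exact absurd hg1 (hn1 g hg)
            all_goals omega)
          omega
        rw [if_pos h2, hbest]; rfl
      · have hn2 : ∀ f ∈ fields, ¬ PySem.Str.startswith f "mag" = true := by
          intro f hfm hc; exact h2 (List.any_eq_true.mpr ⟨f, hfm, hc⟩)
        rw [if_neg h2]
        by_cases h3 : fields.any (fun f => PySem.Str.startswith f "incli") = true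
        · rcases List.any_eq_true.mp h3 with ⟨f, hfm, hc⟩
          have hp : pvPrio f = 3 := by
            unfold pvPrio
            rw [if_neg (hn0 f hfm), if_neg (hn1 f hfm), if_neg (hn2 f hfm), if_pos hc]
          have hbest : pvFold 7 fields = 3 := by
            have hle := pvFold_le_mem fields 7 f hfm
            have := pvFold_ge fields 7 3 (by omega) (fun g hg => by
              unfold pvPrio
              split_ifs with hg0 hg1 hg2
              · exact absurd hg0 (hn0 g hg)
              · exact absurd hg1 (hn1 g hg)
              · exact absurd hg2 (hn2 g hg)
              all_goals omega)
            omega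
          rw [if_pos h3, hbest]; rfl
        · have hn3 : ∀ f ∈ fields, ¬ PySem.Str.startswith f "incli" = true := by
            intro f hfm hc; exact h3 (List.any_eq_true.mpr ⟨f, hfm, hc⟩)
          rw [if_neg h3]
          by_cases h4 : fields.any (fun f => f == "temperature" || f == "temp") = true
          · rcases List.any_eq_true.mp h4 with ⟨f, hfm, hc⟩
            have hp : pvPrio f = 4 := by
              unfold pvPrio
              rw [if_neg (hn0 f hfm), if_neg (hn1 f hfm), if_neg (hn2 f hfm),
                if_neg (hn3 f hfm), if_pos hc]
            have hbest : pvFold 7 fields = 4 := by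
              have hle := pvFold_le_mem fields 7 f hfm
              have := pvFold_ge fields 7 4 (by omega) (fun g hg => by
                unfold pvPrio
                split_ifs with hg0 hg1 hg2 hg3
                · exact absurd hg0 (hn0 g hg)
                · exact absurd hg1 (hn1 g hg)
                · exact absurd hg2 (hn2 g hg)
                · exact absurd hg3 (hn3 g hg)
                all_goals omega)
              omega
            rw [if_pos h4, hbest]; rfl
          · have hn4 : ∀ f ∈ fields, ¬ (f == "temperature" || f == "temp") = true := by
              intro f hfm hc; exact h4 (List.any_eq_true.mpr ⟨f, hfm, hc⟩)
            rw [if_neg h4]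
            by_cases h5 : fields.any (fun f => f == "humidity" || f == "hum") = true
            · rcases List.any_eq_true.mp h5 with ⟨f, hfm, hc⟩
              have hp : pvPrio f = 5 := by
                unfold pvPrio
                rw [if_neg (hn0 f hfm), if_neg (hn1 f hfm), if_neg (hn2 f hfm),
                  if_neg (hn3 f hfm), if_neg (hn4 f hfm), if_pos hc]
              have hbest : pvFold 7 fields = 5 := by
                have hle := pvFold_le_mem fields 7 f hfm
                have := pvFold_ge fields 7 5 (by omega) (fun g hg => by
                  unfold pvPrio
                  split_ifs with hg0 hg1 hg2 hg3 hg4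
                  · exact absurd hg0 (hn0 g hg)
                  · exact absurd hg1 (hn1 g hg)
                  · exact absurd hg2 (hn2 g hg)
                  · exact absurd hg3 (hn3 g hg)
                  · exact absurd hg4 (hn4 g hg)
                  all_goals omega)
                omega
              rw [if_pos h5, hbest]; rfl
            · have hn5 : ∀ f ∈ fields, ¬ (f == "humidity" || f == "hum") = true := by
                intro f hfm hc; exact h5 (List.any_eq_true.mpr ⟨f, hfm, hc⟩)
              rw [if_neg h5]
              by_cases h6 : fields.any (fun f => f == "pressure" || f == "press") = true
              · rcases List.any_eq_true.mp h6 with ⟨f, hfm, hc⟩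
                have hp : pvPrio f = 6 := by
                  unfold pvPrio
                  rw [if_neg (hn0 f hfm), if_neg (hn1 f hfm), if_neg (hn2 f hfm),
                    if_neg (hn3 f hfm), if_neg (hn4 f hfm), if_neg (hn5 f hfm), if_pos hc]
                have hbest : pvFold 7 fields = 6 := by
                  have hle := pvFold_le_mem fields 7 f hfm
                  have := pvFold_ge fields 7 6 (by omega) (fun g hg => by
                    unfold pvPrio
                    split_ifs with hg0 hg1 hg2 hg3 hg4 hg5
                    · exact absurd hg0 (hn0 g hg)
                    · exact absurd hg1 (hn1 g hg)
                    · exact absurd hg2 (hn2 g hg)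
                    · exact absurd hg3 (hn3 g hg)
                    · exact absurd hg4 (hn4 g hg)
                    · exact absurd hg5 (hn5 g hg)
                    all_goals omega)
                  omega
                rw [if_pos h6, hbest]; rfl
              · have hn6 : ∀ f ∈ fields, ¬ (f == "pressure" || f == "press") = true := by
                  intro f hfm hc; exact h6 (List.any_eq_true.mpr ⟨f, hfm, hc⟩)
                rw [if_neg h6]
                have hbest : pvFold 7 fields = 7 := by
                  have hle := pvFold_le_init fields 7
                  have := pvFold_ge fields 7 7 (by omega) (fun g hg => by
                    unfold pvPrio
                    split_ifs with hg0 hg1 hg2 hg3 hg4 hg5 hg6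
                    · exact absurd hg0 (hn0 g hg)
                    · exact absurd hg1 (hn1 g hg)
                    · exact absurd hg2 (hn2 g hg)
                    · exact absurd hg3 (hn3 g hg)
                    · exact absurd hg4 (hn4 g hg)
                    · exact absurd hg5 (hn5 g hg)
                    · exact absurd hg6 (hn6 g hg)
                    all_goals omega)
                  omega
                rw [hbest]; rfl
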